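-- pv_equiv track=rewrite | github.com/malbarbo/spython | compiler/tests/generated/07-outras-formas-de-repeticao/solucoes/indices_colunas_soma_zero.py | indices_colunas_soma_zero
-- ===== SOURCE A (Python) =====
-- def indices_colunas_soma_zero(a: list[list[int]]) -> list[int]:
--     '''
--     Devolve uma lista com os índices das colunas cuja a soma é zero.
--
--     Exemplo
--     >>> indices_colunas_soma_zero([
--     ... [6,  1, 2, 3],
--     ... [2,  1, 1, -4],
--     ... [7, -2, 4, 1]
--     ... ])
--     [1, 3]
--     '''
--     indices = []
--     for j in range(len(a[0])):
--         soma = 0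
--         for i in range(len(a)):
--             soma = soma + a[i][j]
--         if soma == 0:
--             indices.append(j)
--     return indices
-- ===== SOURCE B (Python) =====
-- def indices_colunas_soma_zero(a: list[list[int]]) -> list[int]:
--     # Accumulate-then-collect: one running-totals table built row-major,
--     # then a single collection pass over the totals.
--     somas = [0] * len(a[0])
--     for row in a:
--         somas = [somas[j] + row[j] for j in range(len(somas))]
--     return [j for j in range(len(somas)) if somas[j] == 0]
-- ===== Notes on version B (the rewrite author's own statement) =====
-- stated objective: alternative
-- what changed: Replaces A's column-by-column nested scan (recomputing each column sum with an inner loop over rows) with a row-major accumulate-then-collect pass: a running-totals table updated once per row, then a separate pass collecting the zero-sum indices.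
import Mathlib
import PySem

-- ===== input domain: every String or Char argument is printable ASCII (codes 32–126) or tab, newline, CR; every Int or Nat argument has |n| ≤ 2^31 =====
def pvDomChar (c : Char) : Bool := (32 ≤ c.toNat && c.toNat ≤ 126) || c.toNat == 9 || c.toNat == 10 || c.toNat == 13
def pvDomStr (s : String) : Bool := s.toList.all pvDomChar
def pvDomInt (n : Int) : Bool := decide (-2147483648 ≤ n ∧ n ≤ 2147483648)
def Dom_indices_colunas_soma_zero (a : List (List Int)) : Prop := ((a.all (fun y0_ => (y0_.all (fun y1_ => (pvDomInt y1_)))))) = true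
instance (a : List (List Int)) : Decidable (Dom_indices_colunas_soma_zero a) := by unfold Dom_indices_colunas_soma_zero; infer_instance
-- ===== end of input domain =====

-- B replaces A's column-by-column nested scan with a row-major running-totals
-- table followed by a separate collection pass (alternative decomposition, same cost).

-- ===== PORT A =====
-- Literal port of A: for j in range(len(a[0])): inner loop sums a[i][j]; append j when the sum is 0.
def indices_colunas_soma_zero (a : List (List Int)) : List Int :=
  (PySem.List.pyRange 0 ((PySem.List.pyGetD a 0 []).length : Int) 1).foldl
    (fun indices j =>
      let soma := (PySem.List.pyRange 0 (a.length : Int) 1).foldl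
        (fun soma i => soma + PySem.List.pyGetD (PySem.List.pyGetD a i []) j 0) 0
      if soma = 0 then indices ++ [j] else indices) []

-- ===== PORT B =====
-- Literal port of Source B: somas = [0]*len(a[0]); per-row comprehension rebuilds somas; final filter pass.
def indices_colunas_soma_zero_alt (a : List (List Int)) : List Int :=
  let somas := a.foldl
    (fun somas row =>
      (PySem.List.pyRange 0 (somas.length : Int) 1).map
        (fun j => PySem.List.pyGetD somas j 0 + PySem.List.pyGetD row j 0))
    (List.replicate (PySem.List.pyGetD a 0 []).length (0 : Int))
  (PySem.List.pyRange 0 (somas.length : Int) 1).filter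
    (fun j => PySem.List.pyGetD somas j 0 == 0)

-- ===== PRECONDITION & SPEC =====
-- Pre_ excludes exactly the inputs where Python A raises IndexError: the empty list
-- (a[0]) and ragged inputs with some row shorter than the first row.
def Pre_indices_colunas_soma_zero (a : List (List Int)) : Prop :=
  a ≠ [] ∧ ∀ r ∈ a, a.headI.length ≤ r.length
instance (a : List (List Int)) : Decidable (Pre_indices_colunas_soma_zero a) := by
  unfold Pre_indices_colunas_soma_zero; infer_instance

def pvWitness_indices_colunas_soma_zero : List (List Int) :=
  [[6, 1, 2, 3], [2, 1, 1, -4], [7, -2, 4, 1]]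

def Spec_indices_colunas_soma_zero (a : List (List Int)) (out : List Int) : Prop :=
  out = indices_colunas_soma_zero_alt a
instance (a : List (List Int)) (out : List Int) : Decidable (Spec_indices_colunas_soma_zero a out) := by
  unfold Spec_indices_colunas_soma_zero; infer_instance

-- ===== CLAIM (what is proved, stated in full; the proofs are below) =====
def Claim_equal_indices_colunas_soma_zero : Prop :=
  ∀ (a : List (List Int)), Dom_indices_colunas_soma_zero a →
    Pre_indices_colunas_soma_zero a →
    Spec_indices_colunas_soma_zero a (indices_colunas_soma_zero a)

-- ===== LEMMAS AND PROOFS =====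

-- column sum of the whole matrix at index j
def pvColSum (a : List (List Int)) (j : Int) : Int :=
  (a.map (fun r => PySem.List.pyGetD r j 0)).sum

-- A's inner loop computes the column sum.
lemma a_inner (a : List (List Int)) (j : Int) :
    (PySem.List.pyRange 0 (a.length : Int) 1).foldl
      (fun soma i => soma + PySem.List.pyGetD (PySem.List.pyGetD a i []) j 0) 0
    = pvColSum a j := by
  rw [PySem.List.foldl_pyRange_zero_pyGetD' a [] (fun s r => s + PySem.List.pyGetD r j 0) 0]
  unfold pvColSum
  induction a using List.reverseRecOn with
  | nil => simp
  | append_singleton xs x ih => simp [ih]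

-- invariant of B's accumulation loop
lemma b_inv (l : List (List Int)) (s : List Int) :
    l.foldl
      (fun somas row =>
        (PySem.List.pyRange 0 (somas.length : Int) 1).map
          (fun j => PySem.List.pyGetD somas j 0 + PySem.List.pyGetD row j 0)) s
    = (PySem.List.pyRange 0 (s.length : Int) 1).map
        (fun j => PySem.List.pyGetD s j 0 + pvColSum l j) := by
  induction l generalizing s with
  | nil =>
      simp only [List.foldl_nil, pvColSum, List.map_nil, List.sum_nil, Int.add_zero]
      exact (PySem.List.map_pyGetD_pyRange_zero' s 0).symm
  | cons r l ih =>
      rw [List.foldl_cons, ih]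
      have hlen : ((PySem.List.pyRange 0 (s.length : Int) 1).map
          (fun j => PySem.List.pyGetD s j 0 + PySem.List.pyGetD r j 0)).length = s.length := by
        simp [PySem.List.length_pyRange_one]
      rw [hlen]
      apply List.map_congr_left
      intro j hj
      rw [PySem.List.mem_pyRange_one] at hj
      rw [PySem.List.pyGetD_map_pyRange_of_nonneg _ _ _ _ hj.1 (by simpa using hj.2)]
      simp [pvColSum, Int.add_assoc]

theorem indices_colunas_soma_zero_spec_aux (a : List (List Int)) :
    indices_colunas_soma_zero a = indices_colunas_soma_zero_alt a := by
  unfold indices_colunas_soma_zero indices_colunas_soma_zero_alt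
  rw [b_inv]
  simp only [List.length_replicate]
  set n := (PySem.List.pyGetD a 0 []).length with hn
  have hlen : ((PySem.List.pyRange 0 (n : Int) 1).map
      (fun j => PySem.List.pyGetD (List.replicate n (0:Int)) j 0 + pvColSum a j)).length = n := by
    simp [PySem.List.length_pyRange_one]
  rw [hlen]
  have hfold : ∀ (js : List Int) (acc : List Int),
      (∀ j ∈ js, 0 ≤ j ∧ j < (n : Int)) →
      js.foldl (fun indices j =>
        if ((PySem.List.pyRange 0 (a.length : Int) 1).foldl
          (fun soma i => soma + PySem.List.pyGetD (PySem.List.pyGetD a i []) j 0) 0) = 0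
        then indices ++ [j] else indices) acc
      = acc ++ js.filter (fun j =>
          PySem.List.pyGetD ((PySem.List.pyRange 0 (n : Int) 1).map
            (fun j => PySem.List.pyGetD (List.replicate n (0:Int)) j 0 + pvColSum a j)) j 0 == 0) := by
    intro js
    induction js with
    | nil => intro acc _; simp
    | cons j js ih =>
        intro acc hmem
        obtain ⟨hj0, hjlt⟩ := hmem j (List.mem_cons_self ..)
        rw [List.foldl_cons, ih _ (fun x hx => hmem x (List.mem_cons_of_mem _ hx)),
          a_inner, List.filter_cons]
        have hget : PySem.List.pyGetD ((PySem.List.pyRange 0 (n : Int) 1).map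
            (fun j => PySem.List.pyGetD (List.replicate n (0:Int)) j 0 + pvColSum a j)) j 0
            = PySem.List.pyGetD (List.replicate n (0:Int)) j 0 + pvColSum a j :=
          PySem.List.pyGetD_map_pyRange_of_nonneg _ _ _ _ hj0 hjlt
        have hrep : PySem.List.pyGetD (List.replicate n (0:Int)) j 0 = 0 := by
          have hjn : j = ((j.toNat : Nat) : Int) := by omega
          rw [hjn, PySem.List.pyGetD_natCast]
          simp
        rw [hget, hrep, Int.zero_add]
        by_cases h : pvColSum a j = 0 <;> simp [h]
  rw [hfold _ [] (fun j hj => by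
      rw [PySem.List.mem_pyRange_one] at hj; exact ⟨hj.1, hj.2⟩), List.nil_append]
-- ===== VERDICT (by name: the statement is the Claim_ definition above) =====
theorem indices_colunas_soma_zero_spec : Claim_equal_indices_colunas_soma_zero := by
  intro a _ _
  exact indices_colunas_soma_zero_spec_aux a
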